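-- pv_equiv track=rewrite | github.com/Punssama/SchoolWork | Python/school/DangHuyPhong_66KTPM2_BTVN/buoi_4/53_DangHuyPhong_66KTPM2_C4_B1.py | checkExclamation
-- ===== SOURCE A (Python) =====
-- def checkExclamation(s):
--     c = 0
--     for i in reversed(s):
--         if i == "!":
--             c += 1
--         else:
--             break
--     return c
-- ===== SOURCE B (Python) =====
-- def checkExclamation(s):
--     return len(s) - len(s.rstrip('!'))
-- ===== Notes on version B (the rewrite author's own statement) =====
-- stated objective: simpler
-- what changed: Replaces the explicit reverse-iteration counter loop with a closed-form length difference: strip the trailing run of '!' with str.rstrip and subtract lengths.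
import Mathlib
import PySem

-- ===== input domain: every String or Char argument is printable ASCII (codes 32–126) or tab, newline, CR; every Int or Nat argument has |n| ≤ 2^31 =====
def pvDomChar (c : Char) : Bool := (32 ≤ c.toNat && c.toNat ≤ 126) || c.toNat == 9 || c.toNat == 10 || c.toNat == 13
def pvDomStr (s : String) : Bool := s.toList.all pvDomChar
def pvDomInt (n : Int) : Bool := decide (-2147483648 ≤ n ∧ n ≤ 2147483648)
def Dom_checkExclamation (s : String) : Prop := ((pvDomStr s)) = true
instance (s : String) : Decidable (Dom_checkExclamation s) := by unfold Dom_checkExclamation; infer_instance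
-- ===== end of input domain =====

-- B replaces A's reverse-iteration counter loop by a closed-form length difference via rstrip('!'); objective: simpler.

-- ===== PORT A =====
-- the 'for i in reversed(s): if i == "!": c += 1 else: break' loop, as recursion over the reversed char list
def checkExclamationGo : List Char → Int → Int
  | [], c => c
  | i :: rest, c => if i == '!' then checkExclamationGo rest (c + 1) else c

def checkExclamation (s : String) : Int := checkExclamationGo s.toList.reverse 0

-- ===== PORT B =====
-- s.rstrip('!') ported by hand (PySem has no chars-argument rstrip): drop the trailing run of '!';
-- exact: Python's rstrip(chars) removes exactly the maximal trailing run of characters in the set.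
def pyRstripBang (cs : List Char) : List Char := (cs.reverse.dropWhile (· == '!')).reverse

def checkExclamation_alt (s : String) : Int :=
  (s.toList.length : Int) - ((pyRstripBang s.toList).length : Int)

-- ===== PRECONDITION & SPEC =====
def Spec_checkExclamation (s : String) (out : Int) : Prop := out = checkExclamation_alt s
instance (s : String) (out : Int) : Decidable (Spec_checkExclamation s out) := by unfold Spec_checkExclamation; infer_instance

-- ===== CLAIM (what is proved, stated in full; the proofs are below) =====
def Claim_equal_checkExclamation : Prop := ∀ (s : String), Dom_checkExclamation s → Spec_checkExclamation s (checkExclamation s)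

-- ===== LEMMAS AND PROOFS =====
theorem checkExclamationGo_eq (l : List Char) (c : Int) :
    checkExclamationGo l c = c + (l.takeWhile (· == '!')).length := by
  induction l generalizing c with
  | nil => simp [checkExclamationGo]
  | cons i rest ih =>
    by_cases h : i = '!'
    · simp [checkExclamationGo, h, ih]; omega
    · simp [checkExclamationGo, h]

-- ===== VERDICT (by name: the statement is the Claim_ definition above) =====
theorem checkExclamation_spec : Claim_equal_checkExclamation := by
  intro s _
  unfold Spec_checkExclamation checkExclamation checkExclamation_alt pyRstripBang
  rw [checkExclamationGo_eq]
  have h := List.takeWhile_append_dropWhile (l := s.toList.reverse) (p := (· == '!'))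
  have h2 : (List.takeWhile (· == '!') s.toList.reverse).length
      + (List.dropWhile (· == '!') s.toList.reverse).length = s.toList.length := by
    have hl := congrArg List.length h
    rw [List.length_append] at hl
    simpa using hl
  simp only [List.length_reverse]
  omega
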